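-- pv_equiv track=rewrite | github.com/gimgyuwon/Algorithm | 백준/Silver/11057. 오르막 수/오르막 수.py | ascent_num
-- ===== SOURCE A (Python) =====
-- def ascent_num(n):
--     dp = [[0]*10 for _ in range (n)]
--     for x in range(10):
--         dp[0][x] = 1
--     for y in range(n):
--         dp[y][0] = 1
--
--     for y in range(1, n):
--         for x in range(1, 10):
--             dp[y][x] = dp[y-1][x] + dp[y][x-1]
--     return sum(dp[n-1]) % 10007
-- ===== SOURCE B (Python) =====
-- def ascent_num(n):
--     # closed form: ascending-digit strings of length n = C(n+9, 9)
--     r = 1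
--     for i in range(1, 10):
--         r = r * (n + i) // i
--     return r % 10007
-- ===== Notes on version B (the rewrite author's own statement) =====
-- stated objective: faster
-- what changed: Replaces the n-by-10 dynamic-programming table with the closed form C(n+9,9) computed by a 9-step exact-division product.
import Mathlib
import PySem

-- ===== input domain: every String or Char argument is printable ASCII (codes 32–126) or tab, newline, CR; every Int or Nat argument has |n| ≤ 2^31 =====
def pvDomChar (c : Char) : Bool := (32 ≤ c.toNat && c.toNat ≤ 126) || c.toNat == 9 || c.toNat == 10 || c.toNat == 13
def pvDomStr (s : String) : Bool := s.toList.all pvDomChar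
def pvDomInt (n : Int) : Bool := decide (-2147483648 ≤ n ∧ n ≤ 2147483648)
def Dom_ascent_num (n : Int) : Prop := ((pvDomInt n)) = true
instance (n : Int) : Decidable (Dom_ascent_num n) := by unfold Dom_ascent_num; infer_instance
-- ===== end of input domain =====

-- B replaces A's n-by-10 dynamic-programming table with the closed form C(n+9,9) mod 10007 (9 exact-division steps): faster.

-- ===== PORT A =====
-- dp[y][x] = v on the table (set is a no-op out of range; Pre_ keeps all indices in range)
def pvSet2 (d : Array (Array Int)) (y x : Nat) (v : Int) : Array (Array Int) :=
  d.setIfInBounds y ((d.getD y #[]).setIfInBounds x v)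

def ascent_num (n : Int) : Int :=
  let N := n.toNat
  let dp0 := Array.replicate N (Array.replicate 10 (0 : Int))
  let dp1 := (List.range 10).foldl (fun d x => pvSet2 d 0 x 1) dp0
  let dp2 := (List.range N).foldl (fun d y => pvSet2 d y 0 1) dp1
  let dp3 := (List.range' 1 (N - 1)).foldl (fun d y =>
      (List.range' 1 9).foldl (fun d x =>
        pvSet2 d y x ((d.getD (y - 1) #[]).getD x 0 + (d.getD y #[]).getD (x - 1) 0)) d) dp2
  PySem.Int.mod ((dp3.getD (N - 1) #[]).toList).sum 10007

-- ===== PORT B =====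
def ascent_num_alt (n : Int) : Int :=
  let r := (PySem.List.pyRange 1 10 1).foldl (fun r i => PySem.Int.floordiv (r * (n + i)) i) 1
  PySem.Int.mod r 10007

-- ===== PRECONDITION & SPEC =====
-- Pre_ excludes n ≤ 0, on which Python A raises IndexError (dp[0][x] on an empty table).
def Pre_ascent_num (n : Int) : Prop := 1 ≤ n
instance (n : Int) : Decidable (Pre_ascent_num n) := by unfold Pre_ascent_num; infer_instance
def pvWitness_ascent_num : Int := 3

def Spec_ascent_num (n : Int) (out : Int) : Prop := out = ascent_num_alt n
instance (n : Int) (out : Int) : Decidable (Spec_ascent_num n out) := by unfold Spec_ascent_num; infer_instance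

-- ===== CLAIM (what is proved, stated in full; the proofs are below) =====
def Claim_equal_ascent_num : Prop := ∀ (n : Int), Dom_ascent_num n → Pre_ascent_num n → Spec_ascent_num n (ascent_num n)

-- ===== LEMMAS AND PROOFS =====
-- list model of the Array table, used only by the proofs
def pvSet2L (d : List (List Int)) (y x : Nat) (v : Int) : List (List Int) :=
  d.set y ((d.getD y []).set x v)

def pvA2L (d : Array (Array Int)) : List (List Int) := d.toList.map Array.toList

theorem pv_getD_toList (a : Array Int) (i : Nat) (d : Int) : a.getD i d = a.toList.getD i d := by
  simp only [Array.getD, List.getD_eq_getElem?_getD]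
  by_cases h : i < a.size
  · simp [h]
  · simp [h]

theorem pv_A2L_getD (d : Array (Array Int)) (y : Nat) :
    (d.getD y #[]).toList = (pvA2L d).getD y [] := by
  unfold pvA2L
  simp only [Array.getD, List.getD_eq_getElem?_getD, List.getElem?_map]
  by_cases h : y < d.size
  · simp [h]
  · simp [h, Array.getElem?_eq_none (by omega : d.size ≤ y)]

theorem pv_A2L_set2 (d : Array (Array Int)) (y x : Nat) (v : Int) :
    pvA2L (pvSet2 d y x v) = pvSet2L (pvA2L d) y x v := by
  unfold pvSet2 pvSet2L
  show pvA2L _ = _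
  unfold pvA2L
  rw [Array.toList_setIfInBounds, List.map_set, Array.toList_setIfInBounds, pv_A2L_getD]
  rfl

theorem pv_val_bridge (d : Array (Array Int)) (y x : Nat) :
    (d.getD y #[]).getD x 0 = ((pvA2L d).getD y []).getD x 0 := by
  rw [pv_getD_toList, pv_A2L_getD]

theorem pv_A2L_foldl {α : Type} (fA : Array (Array Int) → α → Array (Array Int))
    (f : List (List Int) → α → List (List Int))
    (hf : ∀ d a, pvA2L (fA d a) = f (pvA2L d) a) :
    ∀ (l : List α) (d : Array (Array Int)), pvA2L (l.foldl fA d) = l.foldl f (pvA2L d) := by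
  intro l
  induction l with
  | nil => intro d; rfl
  | cons a t ih =>
      intro d
      simp only [List.foldl_cons]
      rw [ih, hf]

theorem pv_inner_bridge (d : Array (Array Int)) (y : Nat) :
    pvA2L ((List.range' 1 9).foldl (fun d x =>
        pvSet2 d y x ((d.getD (y - 1) #[]).getD x 0 + (d.getD y #[]).getD (x - 1) 0)) d)
      = (List.range' 1 9).foldl (fun d x =>
        pvSet2L d y x ((d.getD (y - 1) []).getD x 0 + (d.getD y []).getD (x - 1) 0)) (pvA2L d) := by
  refine pv_A2L_foldl _ _ ?_ _ _
  intro d x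
  rw [pv_A2L_set2, pv_val_bridge, pv_val_bridge]

theorem pv_arr_pipeline (N : Nat) :
    pvA2L ((List.range' 1 (N - 1)).foldl (fun d y =>
        (List.range' 1 9).foldl (fun d x =>
          pvSet2 d y x ((d.getD (y - 1) #[]).getD x 0 + (d.getD y #[]).getD (x - 1) 0)) d)
      ((List.range N).foldl (fun d y => pvSet2 d y 0 1)
        ((List.range 10).foldl (fun d x => pvSet2 d 0 x 1)
          (Array.replicate N (Array.replicate 10 (0 : Int))))))
    = (List.range' 1 (N - 1)).foldl (fun d y =>
        (List.range' 1 9).foldl (fun d x =>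
          pvSet2L d y x ((d.getD (y - 1) []).getD x 0 + (d.getD y []).getD (x - 1) 0)) d)
      ((List.range N).foldl (fun d y => pvSet2L d y 0 1)
        ((List.range 10).foldl (fun d x => pvSet2L d 0 x 1)
          (List.replicate N (List.replicate 10 (0 : Int))))) := by
  rw [pv_A2L_foldl _
        (fun d y => (List.range' 1 9).foldl (fun d x =>
          pvSet2L d y x ((d.getD (y - 1) []).getD x 0 + (d.getD y []).getD (x - 1) 0)) d)
        (fun d y => pv_inner_bridge d y),
      pv_A2L_foldl _ (fun d y => pvSet2L d y 0 1) (fun d y => pv_A2L_set2 d y 0 1),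
      pv_A2L_foldl _ (fun d x => pvSet2L d 0 x 1) (fun d x => pv_A2L_set2 d 0 x 1)]
  congr 1
  unfold pvA2L
  simp

-- the first column / first row of A's table, as a row literal
def pvInit1 : List Int := [1,0,0,0,0,0,0,0,0,0]
-- row y of A's finished table: dp[y][x] = C(x+y, x)
def pvRowB (y : Nat) : List Int := (List.range 10).map (fun x => (((x + y).choose x : Nat) : Int))
-- A's table after the outer loop has processed rows 1..y
def pvDpSpec (N y : Nat) : List (List Int) := (List.range N).map (fun j => if j ≤ y then pvRowB j else pvInit1)

theorem pv_set2_length (d : List (List Int)) (y x : Nat) (v : Int) :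
    (pvSet2L d y x v).length = d.length := by
  simp [pvSet2L]

theorem pv_foldl_len {α : Type} (f : List (List Int) → α → List (List Int))
    (hf : ∀ d a, (f d a).length = d.length) :
    ∀ (l : List α) (d : List (List Int)), (l.foldl f d).length = d.length := by
  intro l
  induction l with
  | nil => intro d; rfl
  | cons a t ih => intro d; simp only [List.foldl_cons]; rw [ih, hf]

theorem pv_foldl_set2_zero (l : List Nat) (r : List Int) (t : List (List Int)) :
    l.foldl (fun d x => pvSet2L d 0 x 1) (r :: t)
      = (l.foldl (fun r x => r.set x 1) r) :: t := by
  induction l generalizing r with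
  | nil => rfl
  | cons a l ih =>
      simp only [List.foldl_cons]
      rw [show pvSet2L (r :: t) 0 a 1 = (r.set a 1) :: t by simp [pvSet2L], ih]

theorem pv_mapRange {α : Type} (f : Nat → α) (N j : Nat) :
    ((List.range N).map f)[j]? = if j < N then some (f j) else none := by
  by_cases hj : j < N
  · rw [if_pos hj, List.getElem?_map, List.getElem?_range hj]
    rfl
  · rw [if_neg hj]
    exact List.getElem?_eq_none (by simp; omega)

theorem pv_foldl_set0_getElem? (k : Nat) (d : List (List Int)) (j : Nat) :
    ((List.range k).foldl (fun d y => pvSet2L d y 0 1) d)[j]?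
      = if j < k then d[j]?.map (fun r => r.set 0 1) else d[j]? := by
  induction k with
  | zero => simp
  | succ k ih =>
      rw [List.range_succ, List.foldl_append]
      simp only [List.foldl_cons, List.foldl_nil]
      have hlen : ((List.range k).foldl (fun d y => pvSet2L d y 0 1) d).length = d.length :=
        pv_foldl_len _ (fun d a => pv_set2_length d a 0 1) _ _
      set D := (List.range k).foldl (fun d y => pvSet2L d y 0 1) d with hD
      rw [show pvSet2L D k 0 1 = D.set k ((D.getD k []).set 0 1) from rfl]
      rw [List.getElem?_set]
      by_cases hkj : k = j
      · subst hkj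
        rw [if_pos rfl, hlen]
        by_cases hk : k < d.length
        · rw [if_pos hk, if_pos (by omega)]
          have hDk : D[k]? = d[k]? := by rw [ih, if_neg (lt_irrefl k)]
          rw [List.getElem?_eq_getElem hk, Option.map_some]
          rw [List.getD_eq_getElem?_getD, hDk, List.getElem?_eq_getElem hk]
          rfl
        · rw [if_neg hk, if_pos (by omega), List.getElem?_eq_none (by omega : d.length ≤ k)]
          rfl
      · rw [if_neg hkj, ih]
        by_cases hjk : j < k
        · rw [if_pos hjk, if_pos (by omega)]
        · rw [if_neg hjk, if_neg (by omega : ¬ j < k + 1)]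

theorem pv_dp2 (N : Nat) (hN : 1 ≤ N) :
    (List.range N).foldl (fun d y => pvSet2L d y 0 1)
      ((List.range 10).foldl (fun d x => pvSet2L d 0 x 1)
        (List.replicate N (List.replicate 10 (0 : Int))))
    = pvDpSpec N 0 := by
  obtain ⟨M, rfl⟩ : ∃ M, N = M + 1 := ⟨N - 1, by omega⟩
  rw [show List.replicate (M+1) (List.replicate 10 (0:Int))
        = (List.replicate 10 (0:Int)) :: List.replicate M (List.replicate 10 (0:Int)) from rfl]
  rw [pv_foldl_set2_zero]
  rw [show (List.range 10).foldl (fun (r : List Int) x => r.set x 1) (List.replicate 10 (0:Int))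
        = List.replicate 10 (1:Int) by decide]
  apply List.ext_getElem?
  intro j
  rw [pv_foldl_set0_getElem?]
  unfold pvDpSpec
  rw [pv_mapRange]
  match j with
  | 0 =>
      rw [if_pos (show 0 < M + 1 by omega), List.getElem?_cons_zero, Option.map_some,
        if_pos (le_refl 0), if_pos (show 0 < M + 1 by omega)]
      decide
  | (i+1) =>
      rw [List.getElem?_cons_succ, List.getElem?_replicate]
      by_cases hi : i < M
      · rw [if_pos hi, if_pos (show i + 1 < M + 1 by omega), Option.map_some,
          if_neg (by omega : ¬ i + 1 ≤ 0), if_pos (show i + 1 < M + 1 by omega)]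
        decide
      · rw [if_neg hi, if_neg (show ¬ i + 1 < M + 1 by omega),
          if_neg (show ¬ i + 1 < M + 1 by omega)]

theorem pv_inner_gen (y : Nat) (hy : y ≠ 0) (p : List Int) :
    ∀ (l : List Nat) (d : List (List Int)), y < d.length → d.getD (y-1) [] = p →
    l.foldl (fun d x => pvSet2L d y x ((d.getD (y - 1) []).getD x 0 + (d.getD y []).getD (x - 1) 0)) d
      = d.set y (l.foldl (fun r x => r.set x (p.getD x 0 + r.getD (x - 1) 0)) (d.getD y [])) := by
  intro l
  induction l with
  | nil =>
      intro d hlen hp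
      simp only [List.foldl_nil]
      apply List.ext_getElem?
      intro j
      rw [List.getElem?_set]
      by_cases h : y = j
      · subst h
        rw [if_pos rfl, if_pos hlen, List.getD_eq_getElem?_getD, List.getElem?_eq_getElem hlen]
        rfl
      · rw [if_neg h]
  | cons a l ih =>
      intro d hlen hp
      simp only [List.foldl_cons]
      have hcur : ∀ r : List Int, (d.set y r).getD y [] = r := by
        intro r
        rw [List.getD_eq_getElem?_getD, List.getElem?_set, if_pos rfl, if_pos hlen]
        rfl
      have hprev : ∀ r : List Int, (d.set y r).getD (y-1) [] = p := by
        intro r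
        rw [List.getD_eq_getElem?_getD, List.getElem?_set, if_neg (by omega : ¬ y = y - 1),
          ← List.getD_eq_getElem?_getD, hp]
      set v := (d.getD (y - 1) []).getD a 0 + (d.getD y []).getD (a - 1) 0 with hv
      rw [show pvSet2L d y a v = d.set y ((d.getD y []).set a v) from rfl]
      rw [ih (d.set y ((d.getD y []).set a v)) (by simpa using hlen) (hprev _)]
      rw [hcur, List.set_set, hv, hp]

theorem pv_rowfold (z : Nat) : ∀ (k : Nat), k ≤ 9 →
    (List.range' 1 k).foldl (fun r x => r.set x ((pvRowB z).getD x 0 + r.getD (x - 1) 0)) pvInit1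
      = (List.range 10).map (fun x => if x ≤ k then (((x + (z+1)).choose x : Nat) : Int) else 0) := by
  intro k
  induction k with
  | zero =>
      intro _
      rw [show List.range 10 = [0,1,2,3,4,5,6,7,8,9] from rfl]
      simp [pvInit1]
  | succ k ih =>
      intro hk
      rw [show List.range' 1 (k+1) = List.range' 1 k ++ [k+1] by
            rw [List.range'_concat, show 1 + 1 * k = k + 1 by omega]]
      rw [List.foldl_append]
      simp only [List.foldl_cons, List.foldl_nil]
      rw [ih (by omega)]
      have hget : ∀ (f : Nat → Int) (j : Nat), j < 10 →
          ((List.range 10).map f).getD j 0 = f j := by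
        intro f j hj
        rw [List.getD_eq_getElem?_getD, pv_mapRange, if_pos hj]
        rfl
      rw [show (pvRowB z).getD (k+1) 0 = (((k + 1 + z).choose (k+1) : Nat) : Int) from
        hget _ (k+1) (by omega)]
      rw [show ((List.range 10).map (fun x => if x ≤ k then (((x + (z+1)).choose x : Nat) : Int) else 0)).getD (k + 1 - 1) 0
            = (((k + (z+1)).choose k : Nat) : Int) by
          rw [show k + 1 - 1 = k from rfl, hget _ k (by omega)]; simp]
      apply List.ext_getElem?
      intro j
      rw [List.getElem?_set, pv_mapRange, pv_mapRange]
      by_cases hj : k + 1 = j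
      · subst hj
        rw [if_pos rfl, if_pos (by simp; omega), if_pos (show k + 1 < 10 by omega),
          if_pos (le_refl (k+1))]
        congr 1
        rw [show (k + 1) + (z + 1) = (z + k + 1) + 1 by omega,
            show k + 1 + z = z + k + 1 by omega, show k + (z + 1) = z + k + 1 by omega]
        push_cast [Nat.choose_succ_succ (z + k + 1) k]
        ring
      · rw [if_neg hj]
        by_cases hj10 : j < 10
        · rw [if_pos hj10, if_pos hj10]
          congr 1
          by_cases hjk : j ≤ k
          · rw [if_pos hjk, if_pos (by omega)]
          · rw [if_neg hjk, if_neg (by omega)]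
        · rw [if_neg hj10, if_neg hj10]

theorem pv_rowB_step (z : Nat) :
    (List.range' 1 9).foldl (fun r x => r.set x ((pvRowB z).getD x 0 + r.getD (x - 1) 0)) pvInit1
      = pvRowB (z + 1) := by
  rw [pv_rowfold z 9 (le_refl _)]
  unfold pvRowB
  apply List.map_congr_left
  intro x hx
  rw [if_pos (by simpa using Nat.lt_succ_iff.mp (List.mem_range.mp hx))]

theorem pv_dpSpec_getD (N y j : Nat) (hj : j < N) :
    (pvDpSpec N y).getD j [] = if j ≤ y then pvRowB j else pvInit1 := by
  unfold pvDpSpec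
  rw [List.getD_eq_getElem?_getD, List.getElem?_map, List.getElem?_range hj]
  rfl

theorem pv_outer (N : Nat) (hN : 1 ≤ N) : ∀ (k : Nat), k ≤ N - 1 →
    (List.range' 1 k).foldl (fun d y =>
        (List.range' 1 9).foldl (fun d x =>
          pvSet2L d y x ((d.getD (y - 1) []).getD x 0 + (d.getD y []).getD (x - 1) 0)) d)
      (pvDpSpec N 0)
    = pvDpSpec N k := by
  intro k
  induction k with
  | zero => intro _; rfl
  | succ k ih =>
      intro hk
      rw [show List.range' 1 (k+1) = List.range' 1 k ++ [k+1] by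
            rw [List.range'_concat, show 1 + 1 * k = k + 1 by omega]]
      rw [List.foldl_append]
      simp only [List.foldl_cons, List.foldl_nil]
      rw [ih (by omega)]
      have hlen : k + 1 < (pvDpSpec N k).length := by
        unfold pvDpSpec; simp; omega
      rw [pv_inner_gen (k+1) (by omega) (pvRowB k) _ _ hlen
        (by rw [show k + 1 - 1 = k from rfl, pv_dpSpec_getD N k k (by omega)]; simp)]
      rw [pv_dpSpec_getD N k (k+1) (by omega), if_neg (by omega), pv_rowB_step k]
      apply List.ext_getElem?
      intro j
      unfold pvDpSpec
      rw [List.getElem?_set, pv_mapRange, pv_mapRange]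
      by_cases hj : k + 1 = j
      · subst hj
        rw [if_pos rfl, if_pos (by simp; omega), if_pos (show k + 1 < N by omega),
          if_pos (le_refl (k+1))]
      · rw [if_neg hj]
        by_cases hjN : j < N
        · rw [if_pos hjN, if_pos hjN]
          congr 1
          by_cases hjk : j ≤ k
          · rw [if_pos hjk, if_pos (by omega)]
          · rw [if_neg hjk, if_neg (by omega)]
        · rw [if_neg hjN, if_neg hjN]

theorem pv_hockey (y : Nat) : ∀ (k : Nat),
    (((List.range (k+1)).map (fun x => (((x + y).choose x : Nat) : Int))).sum)
      = (((y + k + 1).choose k : Nat) : Int) := by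
  intro k
  induction k with
  | zero => simp
  | succ k ih =>
      rw [List.range_succ, List.map_append, List.sum_append, ih]
      simp only [List.map_cons, List.map_nil, List.sum_cons, List.sum_nil, add_zero]
      push_cast [show y + (k + 1) + 1 = (y + k + 1) + 1 by omega,
        show k + 1 + y = y + k + 1 by omega,
        Nat.choose_succ_succ (y + k + 1) k]
      ring

theorem pv_rowB_sum (y : Nat) : (pvRowB y).sum = (((y + 10).choose 9 : Nat) : Int) := by
  unfold pvRowB
  rw [show (10:Nat) = 9 + 1 from rfl, pv_hockey y 9]

theorem pv_bfold (m : Nat) : ∀ (k : Nat),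
    (PySem.List.pyRange 1 ((k:Int)+1) 1).foldl
        (fun r i => PySem.Int.floordiv (r * ((m:Int) + i)) i) 1
      = (((m + k).choose k : Nat) : Int) := by
  intro k
  induction k with
  | zero => simp [PySem.List.pyRange]
  | succ k ih =>
      rw [show ((k+1 : Nat) : Int) + 1 = ((k:Int) + 1) + 1 by push_cast; ring,
        PySem.List.pyRange_one_succ_right (by omega), List.foldl_append]
      simp only [List.foldl_cons, List.foldl_nil]
      rw [ih]
      rw [show ((m:Int) + ((k:Int)+1)) = (((m + (k+1) : Nat)) : Int) by push_cast; ring]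
      rw [show ((((m+k).choose k : Nat)) : Int) * (((m + (k+1) : Nat)) : Int)
            = ((((m+k).choose k * (m + (k+1)) : Nat)) : Int) by push_cast; ring]
      rw [show ((k:Int) + 1) = (((k+1 : Nat)) : Int) by push_cast; ring]
      rw [PySem.Int.floordiv_natCast]
      congr 1
      have h : (m+k).choose k * (m + (k+1)) = (m + (k+1)).choose (k+1) * (k+1) := by
        have h1 := Nat.add_one_mul_choose_eq (m+k) k
        have h2 : m + (k+1) = m + k + 1 := by omega
        rw [h2, mul_comm]
        exact h1
      rw [h, Nat.mul_div_cancel _ (by omega : 0 < k + 1)]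

-- ===== VERDICT (by name: the statement is the Claim_ definition above) =====
theorem ascent_num_spec : Claim_equal_ascent_num := by
  intro n _ hpre
  have hn1 : 1 ≤ n := hpre
  set m : Nat := n.toNat with hm
  have hnm : n = (m : Int) := by omega
  have hm1 : 1 ≤ m := by omega
  unfold Spec_ascent_num ascent_num ascent_num_alt
  simp only []
  rw [pv_A2L_getD, pv_arr_pipeline m]
  rw [pv_dp2 m hm1, pv_outer m hm1 (m-1) (le_refl _)]
  rw [pv_dpSpec_getD m (m-1) (m-1) (by omega), if_pos (le_refl _), pv_rowB_sum]
  rw [show (10:Int) = ((9:Nat):Int) + 1 by norm_num, hnm, pv_bfold m 9]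
  rw [show (m - 1) + 10 = m + 9 by omega]
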